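-- pv_equiv track=rewrite | github.com/hgaburton/quantel | quantel/opt/csf_disco.py | _delete_pair_moves
-- ===== SOURCE A (Python) =====
-- def _delete_pair_moves(sc, prefix):
--     """All unique valid couplings with one '+' and one '-' removed.
--
--     When '+' is removed before '-' (i < j) prefix sums in (i, j] drop by 1;
--     valid iff the minimum in that range is >= 1.  When '-' is removed first
--     (j < i) prefix sums in (j, i] rise by 1 — always valid.
--     """
--     if len(sc) < 2:
--         return set()
--     plus_pos  = [i for i, c in enumerate(sc) if c == '+']
--     minus_pos = [i for i, c in enumerate(sc) if c == '-']
--     seen = set()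
--     for i in plus_pos:
--         for j in minus_pos:
--             if i < j:
--                 # Prefix sums in (i, j] drop by 1 — valid iff min >= 1.
--                 if min(prefix[i + 1 : j + 1]) < 1:
--                     continue
--                 candidate = sc[:i] + sc[i + 1:j] + sc[j + 1:]
--             else:
--                 # Prefix sums in (j, i] rise by 1 — always valid.
--                 candidate = sc[:j] + sc[j + 1:i] + sc[i + 1:]
--             seen.add(candidate)
--     return seen
-- ===== SOURCE B (Python) =====
-- def _delete_pair_moves(sc, prefix):
--     """All unique valid couplings with one '+' and one '-' removed.
--
--     Single-sweep version: for each '+' at i, the minus-before-plus deletions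
--     (always valid) come from a scan of positions j < i, and the plus-before-minus
--     deletions from one forward sweep k > i that maintains the running minimum of
--     prefix[i+1:k+1] incrementally instead of re-scanning a slice per pair.
--     """
--     if len(sc) < 2:
--         return set()
--     n = len(sc)
--     seen = set()
--     for i in range(n):
--         if sc[i] != '+':
--             continue
--         for j in range(i):
--             if sc[j] == '-':
--                 seen.add(sc[:j] + sc[j + 1:i] + sc[i + 1:])
--         m = None
--         for k in range(i + 1, n):
--             if k < len(prefix):
--                 m = prefix[k] if m is None else min(m, prefix[k])
--             if sc[k] == '-' and m is not None and m >= 1: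
--                 seen.add(sc[:i] + sc[i + 1:k] + sc[k + 1:])
--     return seen
-- ===== Notes on version B (the rewrite author's own statement) =====
-- stated objective: alternative
-- what changed: Instead of A's nested loops over precomputed plus/minus position lists with a fresh min(prefix[i+1:j+1]) slice scan per pair, B does, for each '+' at i, one index scan over j<i and one forward sweep over k>i that maintains the running minimum of prefix incrementally, so no per-pair slice re-scan remains.
import Mathlib
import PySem

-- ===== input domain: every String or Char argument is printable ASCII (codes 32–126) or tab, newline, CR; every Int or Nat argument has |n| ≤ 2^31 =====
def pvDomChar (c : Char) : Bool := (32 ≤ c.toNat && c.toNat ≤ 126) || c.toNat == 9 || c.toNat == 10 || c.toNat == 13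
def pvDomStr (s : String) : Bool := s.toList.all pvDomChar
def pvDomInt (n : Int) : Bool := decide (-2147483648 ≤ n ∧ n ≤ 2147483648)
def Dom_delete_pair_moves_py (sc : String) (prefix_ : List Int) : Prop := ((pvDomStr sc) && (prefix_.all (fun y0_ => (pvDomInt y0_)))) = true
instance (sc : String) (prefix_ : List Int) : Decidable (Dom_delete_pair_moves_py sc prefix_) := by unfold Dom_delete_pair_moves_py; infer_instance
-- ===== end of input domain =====

-- B replaces A's per-pair slice re-scan min(prefix[i+1:j+1]) by single forward sweeps per '+'
-- that maintain the running minimum incrementally (objective: alternative algorithm).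

-- sc[:x] + sc[x+1:y] + sc[y+1:]  (the candidate expression both Pythons share verbatim)
def pvCut (cs : List Char) (x y : Int) : String :=
  String.ofList (PySem.List.slice cs none (some x) ++
             PySem.List.slice cs (some (x + 1)) (some y) ++
             PySem.List.slice cs (some (y + 1)) none)

-- ===== PORT A =====
def delete_pair_moves_py (sc : String) (prefix_ : List Int) : List String :=
  let cs := sc.toList
  if cs.length < 2 then PySem.Set.empty else
  let plus_pos : List Int := ((PySem.List.enumerate cs).filter (fun p => p.2 == '+')).map (·.1)
  let minus_pos : List Int := ((PySem.List.enumerate cs).filter (fun p => p.2 == '-')).map (·.1)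
  plus_pos.foldl (fun seen i =>
    minus_pos.foldl (fun seen j =>
      if i < j then
        match PySem.List.min? (PySem.List.slice prefix_ (some (i + 1)) (some (j + 1))) (fun x => x) with
        | none => seen  -- Python's min([]) raises ValueError here; such inputs are outside Pre_
        | some m => if m < 1 then seen else PySem.Set.add seen (pvCut cs i j)
      else PySem.Set.add seen (pvCut cs j i)) seen) PySem.Set.empty

-- ===== PORT B =====
def delete_pair_moves_py_alt (sc : String) (prefix_ : List Int) : List String :=
  let cs := sc.toList
  if cs.length < 2 then PySem.Set.empty else
  let n : Int := cs.length
  (PySem.List.pyRange 0 n).foldl (fun seen i =>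
    if PySem.List.pyGetD cs i ' ' ≠ '+' then seen
    else
      let seen := (PySem.List.pyRange 0 i).foldl (fun seen j =>
        if PySem.List.pyGetD cs j ' ' == '-' then PySem.Set.add seen (pvCut cs j i) else seen) seen
      ((PySem.List.pyRange (i + 1) n).foldl (fun (st : Option Int × List String) k =>
        let m := if k < (prefix_.length : Int) then
            some (match st.1 with
              | none => PySem.List.pyGetD prefix_ k 0
              | some v => min v (PySem.List.pyGetD prefix_ k 0))
          else st.1
        if PySem.List.pyGetD cs k ' ' == '-' then
          match m with
          | some v => if 1 ≤ v then (m, PySem.Set.add st.2 (pvCut cs i k)) else (m, st.2)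
          | none => (m, st.2)
        else (m, st.2)) (none, seen)).2) PySem.Set.empty

-- ===== PRECONDITION & SPEC =====
-- Pre_ excludes exactly the inputs on which A raises ValueError: a '+' at i with some later '-'
-- while len(prefix) <= i+1 makes A's slice prefix[i+1:j+1] empty and min([]) raise.
def Pre_delete_pair_moves_py (sc : String) (prefix_ : List Int) : Prop :=
  ∀ i : Nat, i < sc.toList.length → ∀ j : Nat, j < sc.toList.length →
    (i < j ∧ sc.toList[i]? = some '+' ∧ sc.toList[j]? = some '-') → i + 2 ≤ prefix_.length
instance (sc : String) (prefix_ : List Int) : Decidable (Pre_delete_pair_moves_py sc prefix_) := by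
  unfold Pre_delete_pair_moves_py; infer_instance
def pvWitness_delete_pair_moves_py : String × List Int := ("+-", [0, 1])

def Spec_delete_pair_moves_py (sc : String) (prefix_ : List Int) (out : List String) : Prop := out = delete_pair_moves_py_alt sc prefix_
instance (sc : String) (prefix_ : List Int) (out : List String) : Decidable (Spec_delete_pair_moves_py sc prefix_ out) := by unfold Spec_delete_pair_moves_py; infer_instance

-- ===== CLAIM (what is proved, stated in full; the proofs are below) =====
def Claim_equal_delete_pair_moves_py : Prop := ∀ (sc : String) (prefix_ : List Int), Dom_delete_pair_moves_py sc prefix_ → Pre_delete_pair_moves_py sc prefix_ → Spec_delete_pair_moves_py sc prefix_ (delete_pair_moves_py sc prefix_)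

-- ===== LEMMAS AND PROOFS =====

-- plus_pos / minus_pos are the filtered index range
theorem pvEnumFilterMap (cs : List Char) (c : Char) :
    ∀ (s : Int),
    ((PySem.List.enumerate cs s).filter (fun p => p.2 == c)).map (·.1)
      = (PySem.List.pyRange s (s + cs.length)).filter
          (fun i => PySem.List.pyGetD cs (i - s) ' ' == c) := by
  induction cs with
  | nil =>
      intro s
      simp [PySem.List.enumerate_nil]
  | cons x t ih =>
      intro s
      rw [PySem.List.enumerate_cons]
      have hcons : PySem.List.pyRange s (s + ((x :: t).length : Int))
          = s :: PySem.List.pyRange (s+1) (s + ((x :: t).length : Int)) :=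
        PySem.List.pyRange_one_cons (by simp)
      rw [hcons, List.filter_cons, List.filter_cons]
      have hg : (PySem.List.pyGetD (x :: t) (s - s) ' ' == c) = (x == c) := by
        rw [sub_self, PySem.List.pyGetD_zero_cons]
      rw [hg]
      have htail : (PySem.List.pyRange (s+1) (s + ((x :: t).length : Int))).filter
            (fun i => PySem.List.pyGetD (x :: t) (i - s) ' ' == c)
          = (PySem.List.pyRange (s+1) ((s+1) + (t.length : Int))).filter
            (fun i => PySem.List.pyGetD t (i - (s+1)) ' ' == c) := by
        have hb : s + ((x :: t).length : Int) = (s+1) + (t.length : Int) := by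
          simp [List.length_cons]; omega
        rw [hb]
        apply List.filter_congr
        intro i hi
        have hmem := PySem.List.mem_pyRange_one.mp hi
        have h2 : PySem.List.pyGetD (x :: t) (i - s) ' ' = (x :: t).getD (i - s).toNat ' ' :=
          PySem.List.pyGetD_of_nonneg _ _ (by omega)
        have h3 : PySem.List.pyGetD t (i - (s+1)) ' ' = t.getD (i - (s+1)).toNat ' ' :=
          PySem.List.pyGetD_of_nonneg _ _ (by omega)
        have h4 : (i - s).toNat = (i - (s+1)).toNat + 1 := by omega
        rw [h2, h3, h4, List.getD_cons_succ]
      rw [htail]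
      by_cases hx : (x == c) = true
      · rw [if_pos hx, if_pos hx, List.map_cons, ih (s+1)]
      · rw [if_neg hx, if_neg hx, ih (s+1)]

-- min of a list extended by one element
theorem pvMinAppend (xs : List Int) (v : Int) :
    PySem.List.min? (xs ++ [v]) (fun x => x)
      = some (match PySem.List.min? xs (fun x => x) with
              | none => v
              | some m => min m v) := by
  cases xs with
  | nil => simp [PySem.List.min?]
  | cons x t =>
      simp only [List.cons_append, PySem.List.min?_id_cons, List.foldl_append, List.foldl_cons,
        List.foldl_nil]

-- growing the slice by one position
theorem pvSliceSucc (prefix_ : List Int) (p a : Int) (hp : 0 ≤ p) (ha : p ≤ a) :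
    PySem.List.slice prefix_ (some p) (some (a + 1))
      = PySem.List.slice prefix_ (some p) (some a)
        ++ (if a < (prefix_.length : Int) then [prefix_.getD a.toNat 0] else []) := by
  have h0a : (0:Int) ≤ a := hp.trans ha
  rw [PySem.List.slice_toNat _ hp h0a, PySem.List.slice_toNat _ hp (by omega)]
  have h1 : (a+1).toNat - p.toNat = (a.toNat - p.toNat) + 1 := by omega
  rw [h1, List.take_add_one]
  congr 1
  rw [List.getElem?_drop]
  have h2 : p.toNat + (a.toNat - p.toNat) = a.toNat := by omega
  rw [h2]
  by_cases hl : a.toNat < prefix_.length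
  · rw [if_pos (by omega), List.getElem?_eq_getElem hl]
    simp [List.getD, List.getElem?_eq_getElem hl]
  · rw [if_neg (by omega), List.getElem?_eq_none (by omega)]
    rfl

-- the m-update of one sweep step keeps m = min of the slice seen so far
theorem pvStepMin (prefix_ : List Int) (i a : Int) (hi : 0 ≤ i) (ha : i + 1 ≤ a) :
    (if a < (prefix_.length : Int) then
        some (match PySem.List.min? (PySem.List.slice prefix_ (some (i+1)) (some a)) (fun x => x) with
              | none => PySem.List.pyGetD prefix_ a 0
              | some v => min v (PySem.List.pyGetD prefix_ a 0))
      else PySem.List.min? (PySem.List.slice prefix_ (some (i+1)) (some a)) (fun x => x))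
    = PySem.List.min? (PySem.List.slice prefix_ (some (i+1)) (some (a+1))) (fun x => x) := by
  rw [pvSliceSucc prefix_ (i+1) a (by omega) ha]
  by_cases hl : a < (prefix_.length : Int)
  · rw [if_pos hl, if_pos hl, pvMinAppend]
    rw [PySem.List.pyGetD_of_nonneg _ _ (by omega)]
  · rw [if_neg hl, if_neg hl, List.append_nil]

-- the running-minimum sweep computes exactly A's per-pair slice minima
theorem pvSweep (cs : List Char) (prefix_ : List Int) (i : Int) (hi : 0 ≤ i) :
    ∀ (N : Nat) (b a : Int), (b - a).toNat = N → i + 1 ≤ a → ∀ (seen : List String),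
    ((PySem.List.pyRange a b).foldl (fun (st : Option Int × List String) k =>
        let m := if k < (prefix_.length : Int) then
            some (match st.1 with
              | none => PySem.List.pyGetD prefix_ k 0
              | some v => min v (PySem.List.pyGetD prefix_ k 0))
          else st.1
        if PySem.List.pyGetD cs k ' ' == '-' then
          match m with
          | some v => if 1 ≤ v then (m, PySem.Set.add st.2 (pvCut cs i k)) else (m, st.2)
          | none => (m, st.2)
        else (m, st.2))
      (PySem.List.min? (PySem.List.slice prefix_ (some (i + 1)) (some a)) (fun x => x), seen)).2
    = ((PySem.List.pyRange a b).filter (fun j => PySem.List.pyGetD cs j ' ' == '-')).foldl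
        (fun seen j =>
          match PySem.List.min? (PySem.List.slice prefix_ (some (i + 1)) (some (j + 1))) (fun x => x) with
          | none => seen
          | some m => if m < 1 then seen else PySem.Set.add seen (pvCut cs i j)) seen := by
  intro N
  induction N with
  | zero =>
      intro b a hN ha seen
      rw [PySem.List.pyRange_one_eq_nil (by omega)]
      rfl
  | succ N ih =>
      intro b a hN ha seen
      have hab : a < b := by omega
      rw [PySem.List.pyRange_one_cons hab, List.foldl_cons, List.filter_cons]
      simp only []
      rw [pvStepMin prefix_ i a hi ha]
      by_cases hg : (PySem.List.pyGetD cs a ' ' == '-') = true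
      · rw [if_pos hg, if_pos hg, List.foldl_cons]
        cases hm : PySem.List.min? (PySem.List.slice prefix_ (some (i + 1)) (some (a+1))) (fun x => x) with
        | none =>
            simp only []
            rw [← ih b (a+1) (by omega) (by omega) seen, hm]
        | some v =>
            simp only []
            by_cases hv : 1 ≤ v
            · rw [if_pos hv, if_neg (by omega)]
              rw [← ih b (a+1) (by omega) (by omega) (PySem.Set.add seen (pvCut cs i a)), hm]
            · rw [if_neg hv, if_pos (by omega)]
              rw [← ih b (a+1) (by omega) (by omega) seen, hm]
      · rw [if_neg hg, if_neg hg]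
        rw [← ih b (a+1) (by omega) (by omega) seen]

-- ===== VERDICT (by name: the statement is the Claim_ definition above) =====
theorem delete_pair_moves_py_spec : Claim_equal_delete_pair_moves_py := by
  unfold Claim_equal_delete_pair_moves_py
  intro sc prefix_ _ _
  unfold Spec_delete_pair_moves_py delete_pair_moves_py delete_pair_moves_py_alt
  dsimp only
  by_cases hlen : sc.toList.length < 2
  · rw [if_pos hlen, if_pos hlen]
  · rw [if_neg hlen, if_neg hlen]
    rw [pvEnumFilterMap sc.toList '+' 0, pvEnumFilterMap sc.toList '-' 0]
    simp only [Int.sub_zero, zero_add]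
    rw [List.foldl_filter]
    apply PySem.List.foldl_congr_mem
    intro seen i hi
    have hmem := PySem.List.mem_pyRange_one.mp hi
    by_cases hp : PySem.List.pyGetD sc.toList i ' ' = '+'
    · rw [if_pos (by exact beq_iff_eq.mpr hp), if_neg (by simp [hp])]
      -- split A's minus fold at i and drop position i itself
      rw [PySem.List.pyRange_one_append 0 i ((sc.toList.length : Int)) (by omega) (by omega),
        List.filter_append, List.foldl_append,
        PySem.List.pyRange_one_cons (by omega : i < (sc.toList.length : Int)),
        List.filter_cons]
      rw [if_neg (by simp [hp])]
      -- first segment: j < i, always the else-branch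
      have h1 : ((PySem.List.pyRange 0 i).filter
            (fun j => PySem.List.pyGetD sc.toList j ' ' == '-')).foldl
            (fun seen j =>
              if i < j then
                match PySem.List.min? (PySem.List.slice prefix_ (some (i + 1)) (some (j + 1))) (fun x => x) with
                | none => seen
                | some m => if m < 1 then seen else PySem.Set.add seen (pvCut sc.toList i j)
              else PySem.Set.add seen (pvCut sc.toList j i)) seen
          = (PySem.List.pyRange 0 i).foldl (fun seen j =>
              if PySem.List.pyGetD sc.toList j ' ' == '-' then
                PySem.Set.add seen (pvCut sc.toList j i) else seen) seen := by
        rw [PySem.List.foldl_congr_mem _ _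
          (fun seen j => PySem.Set.add seen (pvCut sc.toList j i)) seen
          (by
            intro acc x hx
            have hx' := PySem.List.mem_pyRange_one.mp (List.mem_of_mem_filter hx)
            rw [if_neg (by omega)])]
        rw [List.foldl_filter]
      rw [h1]
      -- second segment: j > i, the running-minimum sweep
      have h0 : PySem.List.min? (PySem.List.slice prefix_ (some (i + 1)) (some (i + 1))) (fun x => x)
          = none := by
        rw [PySem.List.slice_toNat _ (by omega) (by omega)]
        simp [PySem.List.min?]
      rw [PySem.List.foldl_congr_mem _ _
        (fun seen j =>
          match PySem.List.min? (PySem.List.slice prefix_ (some (i + 1)) (some (j + 1))) (fun x => x) with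
          | none => seen
          | some m => if m < 1 then seen else PySem.Set.add seen (pvCut sc.toList i j)) _
        (by
          intro acc x hx
          have hx' := PySem.List.mem_pyRange_one.mp (List.mem_of_mem_filter hx)
          rw [if_pos (by omega)])]
      rw [← pvSweep sc.toList prefix_ i (by omega) ((sc.toList.length : Int) - (i+1)).toNat
        (sc.toList.length : Int) (i+1) rfl (by omega), h0]
    · rw [if_neg (by simp [hp]), if_pos (by simp [hp])]
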